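-- pv_equiv track=rewrite | github.com/gvitchev/advent-2023 | day3/day3.py | solve
-- ===== SOURCE A (Python) =====
-- def is_number_connected(number_locs, symbol_locs):
--     for symbol_loc in symbol_locs:
--         for number_loc in number_locs:
--             if (
--                 abs(number_loc[0] - symbol_loc[0]) <= 1
--                 and abs(number_loc[1] - symbol_loc[1]) <= 1
--             ):
--                 return True
--     return False
--
-- def solve(input_arr):
--     symbol_locations = []
--     for x, row in enumerate(input_arr):
--         for y, char in enumerate(row):
--             if not char.isdigit() and char != ".":
--                 symbol_locations.append((x, y))
--
--     sum = 0
--     for x, row in enumerate(input_arr):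
--         curr_num = None
--         curr_num_locs = []
--         for y, char in enumerate(row):
--             if char.isdigit():
--                 if curr_num is None:
--                     curr_num = char
--                 else:
--                     curr_num += char
--                 curr_num_locs.append((x, y))
--
--             if curr_num is not None and (y == len(row) - 1 or not char.isdigit()):
--                 if is_number_connected(curr_num_locs, symbol_locations):
--                     sum += int(curr_num)
--                 curr_num = None
--                 curr_num_locs = []
--     return sum
-- ===== SOURCE B (Python) =====
-- def solve(input_arr):
--     grid = input_arr
--
--     def is_sym(x, y):
--         if 0 <= x and x < len(grid):
--             row = grid[x]
--             if 0 <= y and y < len(row):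
--                 c = row[y]
--                 return not c.isdigit() and c != "."
--         return False
--
--     total = 0
--     for x, row in enumerate(grid):
--         n = len(row)
--         y = 0
--         while y < n:
--             if row[y].isdigit():
--                 j = y
--                 while j < n and row[j].isdigit():
--                     j += 1
--                 hit = any(
--                     is_sym(xx, yy)
--                     for xx in (x - 1, x, x + 1)
--                     for yy in range(y - 1, j + 1)
--                 )
--                 if hit:
--                     total += int(row[y:j])
--                 y = j
--             else:
--                 y += 1
--     return total
-- ===== Notes on version B (the rewrite author's own statement) =====
-- stated objective: faster
-- what changed: Instead of collecting all symbol coordinates and testing every digit cell of every number against every symbol, B extracts each maximal digit run by index scanning and checks only the run's constant-size neighbourhood window directly in the grid, dropping the symbol list entirely.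
import Mathlib
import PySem

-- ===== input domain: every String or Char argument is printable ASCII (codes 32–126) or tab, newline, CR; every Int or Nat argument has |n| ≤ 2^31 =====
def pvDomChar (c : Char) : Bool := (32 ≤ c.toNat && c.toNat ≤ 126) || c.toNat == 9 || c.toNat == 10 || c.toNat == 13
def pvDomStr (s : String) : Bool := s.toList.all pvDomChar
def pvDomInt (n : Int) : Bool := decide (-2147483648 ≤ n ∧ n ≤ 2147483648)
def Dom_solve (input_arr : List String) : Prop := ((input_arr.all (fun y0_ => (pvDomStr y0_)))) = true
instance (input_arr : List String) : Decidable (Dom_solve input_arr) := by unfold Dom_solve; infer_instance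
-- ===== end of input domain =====

-- B replaces A's symbol-location list and per-number all-symbols distance scan by direct
-- window checks in the grid around each maximal digit run (faster on symbol-dense grids).

-- ===== PORT A =====
-- helper is_number_connected: for-loops with early `return True` become `List.any`
def isNumberConnected (numberLocs symbolLocs : List (Int × Int)) : Bool :=
  symbolLocs.any fun s => numberLocs.any fun nl =>
    decide ((nl.1 - s.1).natAbs ≤ 1 ∧ (nl.2 - s.2).natAbs ≤ 1)

-- first double loop of solve: collect symbol coordinates
def aSymbols (grid : List String) : List (Int × Int) :=
  (PySem.List.enumerate grid 0).foldl (fun acc xr =>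
    (PySem.List.enumerate xr.2.toList 0).foldl (fun acc2 yc =>
      if !PySem.Chars.isdigit yc.2 && yc.2 != '.' then acc2 ++ [(xr.1, yc.1)] else acc2) acc) []

-- one step of the second loop's inner body; state = (sum, curr_num, curr_num_locs).
-- curr_num is kept as List Char; `int(curr_num)` is PySem.Int.ofChars? with getD 0,
-- exact because the guard ensures curr_num is a nonempty digit string (never ValueError).
def aStep (symlocs : List (Int × Int)) (x n : Int)
    (st : Int × Option (List Char) × List (Int × Int)) (yc : Int × Char) :
    Int × Option (List Char) × List (Int × Int) :=
  let cur' := if PySem.Chars.isdigit yc.2 then some (st.2.1.getD [] ++ [yc.2]) else st.2.1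
  let locs' := if PySem.Chars.isdigit yc.2 then st.2.2 ++ [(x, yc.1)] else st.2.2
  if cur'.isSome && (yc.1 == n - 1 || !PySem.Chars.isdigit yc.2) then
    ((if isNumberConnected locs' symlocs then st.1 + (PySem.Int.ofChars? (cur'.getD [])).getD 0
      else st.1), none, [])
  else (st.1, cur', locs')

def solve (input_arr : List String) : Int :=
  let symlocs := aSymbols input_arr
  (PySem.List.enumerate input_arr 0).foldl (fun s xr =>
    ((PySem.List.enumerate xr.2.toList 0).foldl (aStep symlocs xr.1 (PySem.Str.len xr.2))
      (s, none, [])).1) 0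

-- ===== PORT B =====
-- is_sym(x, y): bounds-checked symbol test directly in the grid
def symAt (grid : List String) (x y : Int) : Bool :=
  if 0 ≤ x ∧ x < (grid.length : Int) then
    match PySem.List.pyGet? grid x with
    | some row =>
      if 0 ≤ y ∧ y < (PySem.Str.len row) then
        match PySem.Chars.pyGet? row.toList y with
        | some c => !PySem.Chars.isdigit c && c != '.'
        | none => false
      else false
    | none => false
  else false

-- inner `while j < n and row[j].isdigit(): j += 1`
-- measure lemma cited by the recursions below
theorem scanEnd_dec (n j : Nat) (h : j < n) : n - (j + 1) < n - j := by omega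

def scanEnd (cs : List Char) (j : Nat) : Nat :=
  if h : j < cs.length then
    if PySem.Chars.isdigit cs[j] then scanEnd cs (j + 1) else j
  else j
termination_by cs.length - j
decreasing_by exact scanEnd_dec cs.length j h

-- facts about scanEnd cited by rowGo's termination proof
theorem le_scanEnd (cs : List Char) (j : Nat) : j ≤ scanEnd cs j := by
  unfold scanEnd
  split
  · split
    · exact Nat.le_trans (Nat.le_succ j) (le_scanEnd cs (j + 1))
    · exact Nat.le_refl j
  · exact Nat.le_refl j
termination_by cs.length - j
decreasing_by exact scanEnd_dec cs.length j (by assumption)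

theorem scanEnd_eq_of_digit (cs : List Char) (j : Nat) (h : j < cs.length)
    (hd : PySem.Chars.isdigit cs[j] = true) : scanEnd cs j = scanEnd cs (j + 1) := by
  conv_lhs => rw [scanEnd]
  simp [h, hd]

theorem lt_scanEnd (cs : List Char) (y : Nat) (h : y < cs.length)
    (hd : PySem.Chars.isdigit cs[y] = true) : y < scanEnd cs y :=
  scanEnd_eq_of_digit cs y h hd ▸
    Nat.lt_of_lt_of_le (Nat.lt_succ_self y) (le_scanEnd cs (y + 1))

theorem rowGo_dec (cs : List Char) (y : Nat) (h : y < cs.length)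
    (hd : PySem.Chars.isdigit cs[y] = true) :
    cs.length - scanEnd cs y < cs.length - y := by
  have h1 := lt_scanEnd cs y h hd
  omega

-- outer `while y < n` loop over one row
def rowGo (grid : List String) (x : Int) (cs : List Char) (y : Nat) (total : Int) : Int :=
  if h : y < cs.length then
    if hd : PySem.Chars.isdigit cs[y] then
      let j := scanEnd cs y
      let hit := [x - 1, x, x + 1].any fun xx =>
        (PySem.List.pyRange ((y : Int) - 1) ((j : Int) + 1) 1).any fun yy => symAt grid xx yy
      rowGo grid x cs j
        (if hit then total + (PySem.Int.ofChars? (PySem.List.slice cs (some (y : Int)) (some (j : Int)))).getD 0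
         else total)
    else rowGo grid x cs (y + 1) total
  else total
termination_by cs.length - y
decreasing_by
  · exact rowGo_dec cs y h hd
  · exact scanEnd_dec cs.length y h

def solve_alt (input_arr : List String) : Int :=
  (PySem.List.enumerate input_arr 0).foldl (fun total xr =>
    rowGo input_arr xr.1 xr.2.toList 0 total) 0

-- ===== PRECONDITION & SPEC =====
-- A is total on Dom (int(curr_num) is always applied to a nonempty digit string), so no Pre_.
def Spec_solve (input_arr : List String) (out : Int) : Prop := out = solve_alt input_arr
instance (input_arr : List String) (out : Int) : Decidable (Spec_solve input_arr out) := by unfold Spec_solve; infer_instance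

-- ===== CLAIM (what is proved, stated in full; the proofs are below) =====
def Claim_equal_solve : Prop := ∀ (input_arr : List String), Dom_solve input_arr → Spec_solve input_arr (solve input_arr)

-- ===== LEMMAS AND PROOFS =====

theorem scanEnd_le_length (cs : List Char) (j : Nat) (h : j ≤ cs.length) :
    scanEnd cs j ≤ cs.length := by
  unfold scanEnd
  split
  · split
    · exact scanEnd_le_length cs (j + 1) (by omega)
    · exact h
  · exact h
termination_by cs.length - j
decreasing_by exact scanEnd_dec cs.length j (by assumption)

theorem scanEnd_eq_self (cs : List Char) (j : Nat)
    (h : ∀ (hj : j < cs.length), PySem.Chars.isdigit cs[j] = false) : scanEnd cs j = j := by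
  conv_lhs => rw [scanEnd]
  split
  · next hj => simp [h hj]
  · rfl

def runsFrom (cs : List Char) (y : Nat) : List (Nat × Nat) :=
  if h : y < cs.length then
    if hd : PySem.Chars.isdigit cs[y] then (y, scanEnd cs y) :: runsFrom cs (scanEnd cs y)
    else runsFrom cs (y + 1)
  else []
termination_by cs.length - y
decreasing_by
  · exact rowGo_dec cs y h hd
  · exact scanEnd_dec cs.length y h

theorem runsFrom_valid_aux (cs : List Char) :
    ∀ (k y : Nat), cs.length - y = k → ∀ r ∈ runsFrom cs y, r.1 < r.2 ∧ r.2 ≤ cs.length := by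
  intro k
  induction k using Nat.strong_induction_on with
  | _ k ih =>
    intro y hk r hr
    rw [runsFrom] at hr
    by_cases h : y < cs.length
    · simp only [h, dite_true, dite_eq_ite] at hr
      by_cases hd : PySem.Chars.isdigit cs[y] = true
      · simp only [hd, if_true] at hr
        have h1 : y < scanEnd cs y := lt_scanEnd cs y h hd
        have h2 : scanEnd cs y ≤ cs.length := scanEnd_le_length cs y (le_of_lt h)
        rcases List.mem_cons.mp hr with h3 | h3
        · subst h3; exact ⟨h1, h2⟩
        · subst hk; exact ih (cs.length - scanEnd cs y) (by omega) (scanEnd cs y) rfl r h3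
      · simp only [hd, Bool.false_eq_true, if_false] at hr
        subst hk; exact ih (cs.length - (y + 1)) (by omega) (y + 1) rfl r hr
    · simp [h] at hr

theorem runsFrom_valid (cs : List Char) (y : Nat) :
    ∀ r ∈ runsFrom cs y, r.1 < r.2 ∧ r.2 ≤ cs.length :=
  runsFrom_valid_aux cs _ y rfl

def digitsOf (cs : List Char) (y j : Nat) : List Char := (cs.drop y).take (j - y)
def locsOf (x : Int) (y j : Nat) : List (Int × Int) :=
  (List.range' y (j - y)).map fun (i : Nat) => (x, (i : Int))

theorem digitsOf_self (cs : List Char) (y : Nat) : digitsOf cs y y = [] := by simp [digitsOf]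
theorem locsOf_self (x : Int) (y : Nat) : locsOf x y y = [] := by simp [locsOf]

theorem digitsOf_append (cs : List Char) (y0 y : Nat) (h0 : y0 ≤ y) (h : y < cs.length) :
    digitsOf cs y0 y ++ [cs[y]] = digitsOf cs y0 (y + 1) := by
  unfold digitsOf
  have h1 : y + 1 - y0 = (y - y0) + 1 := by omega
  rw [h1, List.take_add_one]
  congr 1
  rw [List.getElem?_drop]
  have h2 : y0 + (y - y0) = y := by omega
  rw [h2, List.getElem?_eq_getElem h]
  rfl

theorem locsOf_append (x : Int) (y0 y : Nat) (h0 : y0 ≤ y) :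
    locsOf x y0 y ++ [(x, (y : Int))] = locsOf x y0 (y + 1) := by
  have h1 : y + 1 - y0 = (y - y0) + 1 := by omega
  have h2 : y0 + 1 * (y - y0) = y := by omega
  simp [locsOf, h1, List.range'_concat]
  omega

-- aStep computation lemmas
theorem aStep_nondigit (symlocs : List (Int × Int)) (x n : Int) (s : Int)
    (L : List (Int × Int)) (yc : Int × Char) (hd : PySem.Chars.isdigit yc.2 = false) :
    aStep symlocs x n (s, none, L) yc = (s, none, L) := by
  simp [aStep, hd]

theorem aStep_digit_noflush (symlocs : List (Int × Int)) (x n : Int) (s : Int)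
    (cur : Option (List Char)) (L : List (Int × Int)) (yc : Int × Char)
    (hd : PySem.Chars.isdigit yc.2 = true) (hne : yc.1 ≠ n - 1) :
    aStep symlocs x n (s, cur, L) yc = (s, some (cur.getD [] ++ [yc.2]), L ++ [(x, yc.1)]) := by
  simp [aStep, hd, hne]

theorem aStep_digit_flush (symlocs : List (Int × Int)) (x n : Int) (s : Int)
    (cur : Option (List Char)) (L : List (Int × Int)) (yc : Int × Char)
    (hd : PySem.Chars.isdigit yc.2 = true) (heq : yc.1 = n - 1) :
    aStep symlocs x n (s, cur, L) yc =
      ((if isNumberConnected (L ++ [(x, yc.1)]) symlocs then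
          s + (PySem.Int.ofChars? (cur.getD [] ++ [yc.2])).getD 0 else s), none, []) := by
  simp [aStep, hd, heq]

theorem aStep_nondigit_flush (symlocs : List (Int × Int)) (x n : Int) (s : Int)
    (d : List Char) (L : List (Int × Int)) (yc : Int × Char)
    (hd : PySem.Chars.isdigit yc.2 = false) :
    aStep symlocs x n (s, some d, L) yc =
      ((if isNumberConnected L symlocs then s + (PySem.Int.ofChars? d).getD 0 else s), none, []) := by
  simp [aStep, hd]

theorem if_pull (b : Bool) (s v : Int) : (if b = true then s + v else s) = s + (if b = true then v else 0) := by
  cases b <;> simp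
theorem runsFrom_digit (cs : List Char) (y : Nat) (h : y < cs.length)
    (hd : PySem.Chars.isdigit cs[y] = true) :
    runsFrom cs y = (y, scanEnd cs y) :: runsFrom cs (scanEnd cs y) := by
  conv_lhs => rw [runsFrom]
  simp [h, hd]

theorem runsFrom_nondigit (cs : List Char) (y : Nat) (h : y < cs.length)
    (hd : PySem.Chars.isdigit cs[y] = false) :
    runsFrom cs y = runsFrom cs (y + 1) := by
  conv_lhs => rw [runsFrom]
  simp [h, hd]

theorem runsFrom_oob (cs : List Char) (y : Nat) (h : ¬ y < cs.length) :
    runsFrom cs y = [] := by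
  rw [runsFrom]
  simp [h]

def contribA (symlocs : List (Int × Int)) (x : Int) (cs : List Char) (r : Nat × Nat) : Int :=
  if isNumberConnected (locsOf x r.1 r.2) symlocs then
    (PySem.Int.ofChars? (digitsOf cs r.1 r.2)).getD 0
  else 0

def contribB (grid : List String) (x : Int) (cs : List Char) (r : Nat × Nat) : Int :=
  if [x - 1, x, x + 1].any (fun xx =>
      (PySem.List.pyRange ((r.1 : Int) - 1) ((r.2 : Int) + 1) 1).any fun yy => symAt grid xx yy) then
    (PySem.Int.ofChars? (digitsOf cs r.1 r.2)).getD 0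
  else 0

theorem rowGo_eq_aux (grid : List String) (x : Int) (cs : List Char) :
    ∀ (k y : Nat) (total : Int), cs.length - y = k →
      rowGo grid x cs y total = total + ((runsFrom cs y).map (contribB grid x cs)).sum := by
  intro k
  induction k using Nat.strong_induction_on with
  | _ k ih =>
    intro y total hk
    by_cases h : y < cs.length
    · rw [rowGo, runsFrom]
      by_cases hd : PySem.Chars.isdigit cs[y] = true
      · simp only [h, hd, dite_true, ite_true, dite_eq_ite, if_true, List.map_cons, List.sum_cons]
        have h1 : y < scanEnd cs y := lt_scanEnd cs y h hd
        have h2 : scanEnd cs y ≤ cs.length := scanEnd_le_length cs y (le_of_lt h)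
        subst hk
        rw [ih (cs.length - scanEnd cs y) (by omega) (scanEnd cs y) _ rfl]
        rw [PySem.List.slice_natCast]
        simp only [contribB, digitsOf]
        split_ifs <;> ring
      · simp only [h, hd, dite_true, dite_eq_ite, if_true, Bool.false_eq_true, if_false]
        subst hk
        rw [ih (cs.length - (y + 1)) (by omega) (y + 1) total rfl]
    · rw [rowGo, runsFrom]
      simp [h]

theorem rowGo_eq (grid : List String) (x : Int) (cs : List Char) (y : Nat) (total : Int) :
    rowGo grid x cs y total = total + ((runsFrom cs y).map (contribB grid x cs)).sum :=
  rowGo_eq_aux grid x cs _ y total rfl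

theorem symAt_true_iff (grid : List String) (x y : Int) :
    symAt grid x y = true ↔
      ∃ (a b : Nat), x = (a : Int) ∧ y = (b : Int) ∧
        ∃ (ha : a < grid.length) (hb : b < (grid[a].toList).length),
          (!PySem.Chars.isdigit (grid[a].toList[b]) && grid[a].toList[b] != '.') = true := by
  constructor
  · intro hx
    unfold symAt at hx
    split at hx
    case isTrue hb =>
      obtain ⟨a, rfl⟩ : ∃ a : Nat, x = (a : Int) := ⟨x.toNat, (Int.toNat_of_nonneg hb.1).symm⟩
      have ha : a < grid.length := by exact_mod_cast hb.2
      rw [PySem.List.pyGet?_natCast, List.getElem?_eq_getElem ha] at hx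
      dsimp only [] at hx
      split at hx
      case isTrue hyb =>
        obtain ⟨b, rfl⟩ : ∃ b : Nat, y = (b : Int) := ⟨y.toNat, (Int.toNat_of_nonneg hyb.1).symm⟩
        have hblt : b < (grid[a].toList).length := by
          have h2 := hyb.2
          rw [PySem.Str.len_eq] at h2
          exact_mod_cast h2
        rw [PySem.Chars.pyGet?_eq_listPyGet?, PySem.List.pyGet?_natCast,
            List.getElem?_eq_getElem hblt] at hx
        dsimp only [] at hx
        exact ⟨a, b, rfl, rfl, ha, hblt, hx⟩
      case isFalse => exact absurd hx (by simp)
    case isFalse => exact absurd hx (by simp)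
  · rintro ⟨a, b, rfl, rfl, ha, hb, hc⟩
    unfold symAt
    have h1 : (0 : Int) ≤ (a : Int) ∧ (a : Int) < (grid.length : Int) := ⟨by positivity, by exact_mod_cast ha⟩
    rw [if_pos h1, PySem.List.pyGet?_natCast, List.getElem?_eq_getElem ha]
    dsimp only []
    have h2 : (0 : Int) ≤ (b : Int) ∧ (b : Int) < PySem.Str.len grid[a] := by
      refine ⟨by positivity, ?_⟩
      rw [PySem.Str.len_eq]
      exact_mod_cast hb
    rw [if_pos h2, PySem.Chars.pyGet?_eq_listPyGet?, PySem.List.pyGet?_natCast,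
        List.getElem?_eq_getElem hb]
    exact hc

theorem aSymbols_eq (grid : List String) :
    aSymbols grid = (PySem.List.enumerate grid 0).flatMap (fun xr =>
      ((PySem.List.enumerate xr.2.toList 0).filter
          (fun yc => !PySem.Chars.isdigit yc.2 && yc.2 != '.')).map fun yc => (xr.1, yc.1)) := by
  unfold aSymbols
  exact (PySem.List.foldl_congr_mem _ _
      (fun (acc : List (Int × Int)) (xr : Int × String) =>
        acc ++ ((PySem.List.enumerate xr.2.toList 0).filter
          (fun yc => !PySem.Chars.isdigit yc.2 && yc.2 != '.')).map fun yc => (xr.1, yc.1)) _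
      (fun acc xr _ => PySem.List.foldl_append_if _ _ _ _)).trans
    ((PySem.List.foldl_append_eq_flatMap _ _ _).trans (List.nil_append _))

theorem mem_aSymbols (grid : List String) (p : Int × Int) :
    p ∈ aSymbols grid ↔ ∃ a b : Nat, p = ((a : Int), (b : Int)) ∧ symAt grid (a : Int) (b : Int) = true := by
  rw [aSymbols_eq]
  simp only [List.mem_flatMap, List.mem_map, List.mem_filter, PySem.List.mem_enumerate_iff,
    zero_add]
  constructor
  · rintro ⟨xr, ⟨kk, hkk, rfl⟩, yc, ⟨⟨m, hm, rfl⟩, hsym⟩, rfl⟩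
    refine ⟨kk, m, rfl, ?_⟩
    rw [symAt_true_iff]
    exact ⟨kk, m, rfl, rfl, hkk, hm, hsym⟩
  · rintro ⟨a, b, rfl, hs⟩
    rw [symAt_true_iff] at hs
    obtain ⟨a', b', ha1, hb1, ha', hb', hc⟩ := hs
    have haa : a = a' := by exact_mod_cast ha1
    have hbb : b = b' := by exact_mod_cast hb1
    subst haa
    subst hbb
    exact ⟨((a : Int), grid[a]), ⟨a, ha', rfl⟩,
      ((b : Int), grid[a].toList[b]), ⟨⟨b, hb', rfl⟩, hc⟩, rfl⟩

theorem connected_eq_window (grid : List String) (kk y j : Nat) (hyj : y < j) :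
    isNumberConnected (locsOf (kk : Int) y j) (aSymbols grid)
      = [(kk : Int) - 1, (kk : Int), (kk : Int) + 1].any (fun xx =>
          (PySem.List.pyRange ((y : Int) - 1) ((j : Int) + 1) 1).any fun yy => symAt grid xx yy) := by
  rw [Bool.eq_iff_iff]
  unfold isNumberConnected
  simp only [List.any_eq_true, decide_eq_true_eq, locsOf, List.mem_map, List.mem_range'_1,
    PySem.List.mem_pyRange_one, mem_aSymbols, List.mem_cons, List.not_mem_nil, or_false]
  constructor
  · rintro ⟨p, hp, nl, hnl, hadj⟩
    obtain ⟨a, b, rfl, hsym⟩ := hp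
    obtain ⟨i, hi, rfl⟩ := hnl
    obtain ⟨hi1, hi2⟩ := hi
    obtain ⟨hadj1, hadj2⟩ := hadj
    refine ⟨(a : Int), by omega, (b : Int), by omega, hsym⟩
  · rintro ⟨xx, hxx, yy, hyy, hsym⟩
    have hs2 := hsym
    rw [symAt_true_iff] at hs2
    obtain ⟨a, b, rfl, rfl, ha, hb, hc⟩ := hs2
    obtain ⟨hyy1, hyy2⟩ := hyy
    refine ⟨((a : Int), (b : Int)), ⟨a, b, rfl, hsym⟩, ?_⟩
    rcases Nat.lt_or_ge b y with hby | hby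
    · exact ⟨((kk : Int), (y : Int)), ⟨y, ⟨le_refl y, by omega⟩, rfl⟩, by omega, by omega⟩
    · rcases Nat.lt_or_ge b j with hbj | hbj
      · exact ⟨((kk : Int), (b : Int)), ⟨b, ⟨by omega, by omega⟩, rfl⟩, by omega, by omega⟩
      · exact ⟨((kk : Int), ((j - 1 : Nat) : Int)), ⟨j - 1, ⟨by omega, by omega⟩, rfl⟩, by omega, by omega⟩

theorem aRowAux (symlocs : List (Int × Int)) (x : Int) (cs : List Char) :
    ∀ (k y : Nat), cs.length - y = k →
      ((∀ s : Int, y ≤ cs.length →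
        (PySem.List.enumerate (cs.drop y) (y : Int)).foldl (aStep symlocs x (cs.length : Int))
            (s, none, [])
          = (s + ((runsFrom cs y).map (contribA symlocs x cs)).sum, none, [])) ∧
       (∀ (y0 : Nat) (s : Int), y0 < y → y < cs.length →
        (∀ i (hi : i < cs.length), y0 ≤ i → i < y → PySem.Chars.isdigit cs[i] = true) →
        (PySem.List.enumerate (cs.drop y) (y : Int)).foldl (aStep symlocs x (cs.length : Int))
            (s, some (digitsOf cs y0 y), locsOf x y0 y)
          = (s + contribA symlocs x cs (y0, scanEnd cs y)
               + ((runsFrom cs (scanEnd cs y)).map (contribA symlocs x cs)).sum, none, []))) := by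
  intro k
  induction k using Nat.strong_induction_on with
  | _ k ih =>
    intro y hk
    by_cases h : y < cs.length
    case neg =>
      constructor
      · intro s hyle
        have hyl : y = cs.length := by omega
        subst hyl
        rw [List.drop_length, PySem.List.enumerate_nil, List.foldl_nil,
          runsFrom_oob cs cs.length (by omega)]
        simp
      · intro y0 s h0 hlt _
        exact absurd hlt h
    case pos =>
      have hdrop : cs.drop y = cs[y] :: cs.drop (y + 1) := List.drop_eq_getElem_cons h
      have hcast : ((y : Int) + 1) = ((y + 1 : Nat) : Int) := by push_cast; ring
      have hdig1 : [cs[y]] = digitsOf cs y (y + 1) := by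
        rw [← digitsOf_append cs y y (le_refl y) h, digitsOf_self, List.nil_append]
      have hloc1 : [(x, (y : Int))] = locsOf x y (y + 1) := by
        rw [← locsOf_append x y y (le_refl y), locsOf_self, List.nil_append]
      constructor
      · -- state (s, none, [])
        intro s hyle
        rw [hdrop, PySem.List.enumerate_cons, List.foldl_cons, hcast]
        by_cases hd : PySem.Chars.isdigit cs[y] = true
        · by_cases hlast : y + 1 = cs.length
          · rw [aStep_digit_flush symlocs x _ s none [] ((y : Int), cs[y]) hd (by simp; omega)]
            have hde : cs.drop (y + 1) = [] := by rw [hlast, List.drop_length]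
            rw [hde, PySem.List.enumerate_nil, List.foldl_nil]
            have hse : scanEnd cs y = y + 1 := by
              rw [scanEnd_eq_of_digit cs y h hd]
              exact scanEnd_eq_self cs (y + 1) (fun hj => absurd hj (by omega))
            rw [runsFrom_digit cs y h hd, hse, runsFrom_oob cs (y + 1) (by omega)]
            simp only [List.nil_append, Option.getD_none, List.map_cons, List.map_nil,
              List.sum_cons, List.sum_nil, add_zero]
            rw [if_pull]
            simp only [contribA, ← hdig1, ← hloc1]
          · rw [aStep_digit_noflush symlocs x _ s none [] ((y : Int), cs[y]) hd (by simp; omega)]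
            simp only [Option.getD_none, List.nil_append]
            rw [hdig1, hloc1]
            have hy1 : y + 1 < cs.length := by omega
            have hrec := (ih (cs.length - (y + 1)) (by omega) (y + 1) rfl).2 y s (by omega) hy1
              (fun i hi h1 h2 => by
                have hiy : i = y := by omega
                subst hiy; exact hd)
            rw [hrec, runsFrom_digit cs y h hd, scanEnd_eq_of_digit cs y h hd]
            rw [List.map_cons, List.sum_cons, add_assoc]
        · have hdf : PySem.Chars.isdigit cs[y] = false := by simpa using hd
          rw [aStep_nondigit symlocs x _ s [] ((y : Int), cs[y]) hdf]
          have hrec := (ih (cs.length - (y + 1)) (by omega) (y + 1) rfl).1 s (by omega)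
          rw [hrec, runsFrom_nondigit cs y h hdf]
      · -- state (s, some digits, locs)
        intro y0 s h0 hlt hdig
        rw [hdrop, PySem.List.enumerate_cons, List.foldl_cons, hcast]
        have hga : (some (digitsOf cs y0 y)).getD [] ++ [cs[y]] = digitsOf cs y0 (y + 1) := by
          rw [Option.getD_some]
          exact digitsOf_append cs y0 y (by omega) h
        have hla : locsOf x y0 y ++ [(x, (y : Int))] = locsOf x y0 (y + 1) :=
          locsOf_append x y0 y (by omega)
        by_cases hd : PySem.Chars.isdigit cs[y] = true
        · by_cases hlast : y + 1 = cs.length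
          · rw [aStep_digit_flush symlocs x _ s (some (digitsOf cs y0 y)) (locsOf x y0 y)
              ((y : Int), cs[y]) hd (by simp; omega)]
            rw [hga, hla]
            have hde : cs.drop (y + 1) = [] := by rw [hlast, List.drop_length]
            rw [hde, PySem.List.enumerate_nil, List.foldl_nil]
            have hse : scanEnd cs y = y + 1 := by
              rw [scanEnd_eq_of_digit cs y h hd]
              exact scanEnd_eq_self cs (y + 1) (fun hj => absurd hj (by omega))
            rw [hse, runsFrom_oob cs (y + 1) (by omega)]
            simp only [List.map_nil, List.sum_nil, add_zero]
            rw [if_pull]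
            simp only [contribA]
          · rw [aStep_digit_noflush symlocs x _ s (some (digitsOf cs y0 y)) (locsOf x y0 y)
              ((y : Int), cs[y]) hd (by simp; omega)]
            rw [hga, hla]
            have hy1 : y + 1 < cs.length := by omega
            have hrec := (ih (cs.length - (y + 1)) (by omega) (y + 1) rfl).2 y0 s (by omega) hy1
              (fun i hi h1 h2 => by
                rcases Nat.lt_succ_iff_lt_or_eq.mp h2 with h3 | h3
                · exact hdig i hi h1 h3
                · subst h3; exact hd)
            rw [hrec, scanEnd_eq_of_digit cs y h hd]
        · have hdf : PySem.Chars.isdigit cs[y] = false := by simpa using hd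
          rw [aStep_nondigit_flush symlocs x _ s (digitsOf cs y0 y) (locsOf x y0 y)
            ((y : Int), cs[y]) hdf]
          have hrec := (ih (cs.length - (y + 1)) (by omega) (y + 1) rfl).1
            (if isNumberConnected (locsOf x y0 y) symlocs then
              s + (PySem.Int.ofChars? (digitsOf cs y0 y)).getD 0 else s) (by omega)
          rw [hrec]
          have hse : scanEnd cs y = y := scanEnd_eq_self cs y (fun _ => hdf)
          rw [hse, runsFrom_nondigit cs y h hdf, if_pull]
          simp only [contribA, add_assoc]

theorem solve_eq_solve_alt (grid : List String) : solve grid = solve_alt grid := by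
  unfold solve solve_alt
  apply PySem.List.foldl_congr_mem
  intro s xr hxr
  obtain ⟨kk, hkk, rfl⟩ := (PySem.List.mem_enumerate_iff _ _ _).mp hxr
  simp only [zero_add]
  rw [PySem.Str.len_eq]
  have hA := (aRowAux (aSymbols grid) ((kk : Int)) (grid[kk].toList)
      (grid[kk].toList.length - 0) 0 rfl).1 s (by omega)
  rw [List.drop_zero, Nat.cast_zero] at hA
  rw [hA, rowGo_eq]
  show s + ((runsFrom grid[kk].toList 0).map (contribA (aSymbols grid) _ _)).sum
      = s + ((runsFrom grid[kk].toList 0).map (contribB grid _ _)).sum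
  congr 1
  refine congrArg List.sum (List.map_congr_left ?_)
  intro r hr
  have hv := runsFrom_valid _ _ r hr
  unfold contribA contribB
  rw [connected_eq_window grid kk r.1 r.2 hv.1]

-- ===== VERDICT (by name: the statement is the Claim_ definition above) =====
theorem solve_spec : Claim_equal_solve := by
  intro input_arr _
  unfold Spec_solve
  exact solve_eq_solve_alt input_arr
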